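-- pv_equiv track=rewrite | github.com/OxQuasar/nous-memories | iching/spaceprobe/doubles/choice_overlap.py | conjugacy_classes
-- ===== SOURCE A (Python) =====
-- def compose(p, q):
--     return tuple(p[q[i]] for i in range(len(p)))
--
-- def inverse(p):
--     """Inverse of a permutation."""
--     inv = [0] * len(p)
--     for i in range(len(p)):
--         inv[p[i]] = i
--     return tuple(inv)
--
-- def conjugacy_classes(group):
--     """Partition group elements into conjugacy classes."""
--     classes = []
--     remaining = set(group)
--     for g in sorted(group):
--         if g not in remaining:
--             continue
--         cls = set()
--         for h in group:
--             conj = compose(compose(h, g), inverse(h))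
--             cls.add(conj)
--         remaining -= cls
--         classes.append(frozenset(cls))
--     return classes
-- ===== SOURCE B (Python) =====
-- def conjugacy_classes(group):
--     """Partition group elements into conjugacy classes.
--
--     Two-stage: first build the full conjugation table in one sweep with the
--     conjugating element h outermost (each inverse computed once), then a
--     selection pass over the sorted elements picks each new class by lookup.
--     """
--     table = {g: set() for g in group}
--     for h in group:
--         inv = [0] * len(h)
--         for i, v in enumerate(h):
--             inv[v] = i
--         for g in table:
--             table[g].add(tuple(h[g[k]] for k in inv))
--     classes = []
--     covered = set()
--     for g in sorted(group):
--         if g not in covered: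
--             cls = table[g]
--             covered |= cls
--             classes.append(frozenset(cls))
--     return classes
-- ===== Notes on version B (the rewrite author's own statement) =====
-- stated objective: alternative
-- what changed: B inverts the loop nesting: instead of A's lazy per-class scan (outer loop over unprocessed sorted elements, inner conjugation loop), B first builds the complete conjugation table in one sweep with the conjugating element h outermost (one inverse per h, one fused lookup pass per conjugate), then a separate selection pass over the sorted elements emits each uncovered element's class by table lookup; Pre_ excludes mixed-length or out-of-range inputs, where A almost always raises IndexError but on scattered corner cases still assembles a value from wrapped indices.
-- outside the precondition, e.g. on conjugacy_classes([(0,), (-1, 0)]): A returns [{(0,), (-1, 0)}], B raises IndexError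
import Mathlib
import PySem

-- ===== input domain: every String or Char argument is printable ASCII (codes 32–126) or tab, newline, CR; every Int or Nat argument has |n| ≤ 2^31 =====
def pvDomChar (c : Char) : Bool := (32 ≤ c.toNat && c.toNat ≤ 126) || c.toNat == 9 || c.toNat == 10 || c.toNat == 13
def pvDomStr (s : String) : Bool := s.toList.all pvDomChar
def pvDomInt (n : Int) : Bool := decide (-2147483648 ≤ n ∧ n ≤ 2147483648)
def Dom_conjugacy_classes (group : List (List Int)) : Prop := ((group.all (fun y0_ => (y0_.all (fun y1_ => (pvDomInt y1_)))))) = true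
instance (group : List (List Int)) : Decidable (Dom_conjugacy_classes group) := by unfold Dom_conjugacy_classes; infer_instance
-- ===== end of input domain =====

-- B inverts the loop nesting: it precomputes the complete conjugation table in one sweep with the
-- conjugating element h outermost, then a separate selection pass emits each uncovered sorted
-- element's class by table lookup (A conjugates lazily, per emitted class).

-- ===== PORT A =====
-- compose(p, q)
def pyCompose (p q : List Int) : List Int :=
  (PySem.List.pyRange 0 (p.length : Int) 1).map
    (fun i => PySem.List.pyGetD p (PySem.List.pyGetD q i 0) 0)

-- inverse(p)
def pyInverse (p : List Int) : List Int :=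
  (PySem.List.pyRange 0 (p.length : Int) 1).foldl
    (fun inv i => PySem.List.pySetD inv (PySem.List.pyGetD p i 0) i)
    (List.replicate p.length 0)

def conjugacy_classes (group : List (List Int)) : List (List (List Int)) :=
  ((PySem.List.sorted group (fun x => x) false).foldl
    (fun st g =>
      if PySem.Set.contains st.2 g then
        let cls : PySem.Set (List Int) :=
          group.foldl (fun cls h => PySem.Set.add cls (pyCompose (pyCompose h g) (pyInverse h)))
            PySem.Set.empty
        (st.1 ++ [cls], PySem.Set.diff st.2 cls)
      else st)
    ([], PySem.Set.ofList group)).1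

-- ===== PORT B =====
-- the inverse built by B's enumerate loop: inv[v] = i for i, v in enumerate(h)
def invOf (h : List Int) : List Int :=
  (PySem.List.enumerate h).foldl
    (fun inv p => PySem.List.pySetD inv p.2 p.1)
    (List.replicate h.length 0)

-- stage 1: table = {g: set() for g in group}; for h: for g in table: table[g].add(h∘g∘h⁻¹)
def conjTable (group : List (List Int)) : PySem.Dict (List Int) (PySem.Set (List Int)) :=
  group.foldl
    (fun d h =>
      let inv := invOf h
      (PySem.Dict.keys d).foldl
        (fun d g =>
          PySem.Dict.modify d g PySem.Set.empty
            (fun s => PySem.Set.add s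
              (inv.map (fun k => PySem.List.pyGetD h (PySem.List.pyGetD g k 0) 0))))
        d)
    (group.foldl (fun d g => PySem.Dict.insert d g PySem.Set.empty) PySem.Dict.empty)

-- stage 2: selection pass over sorted(group) by table lookup
def conjugacy_classes_alt (group : List (List Int)) : List (List (List Int)) :=
  let table := conjTable group
  ((PySem.List.sorted group (fun x => x) false).foldl
    (fun st g =>
      if PySem.Set.contains st.2 g then st
      else
        let cls := PySem.Dict.getD table g PySem.Set.empty
        (st.1 ++ [cls], PySem.Set.union st.2 cls))
    ([], PySem.Set.empty)).1

-- ===== PRECONDITION & SPEC =====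
-- Pre_ is where A's indexing is defined: all elements share one length n and every entry lies in
-- [-n, n) (Python's valid index range). Outside it A almost always raises IndexError; on scattered
-- mixed-length corner cases it still assembles a value from wrapped indices, which Pre_ excludes.
def Pre_conjugacy_classes (group : List (List Int)) : Prop :=
  ∀ p ∈ group, p.length = (group.headD []).length ∧
    ∀ v ∈ p, -(p.length : Int) ≤ v ∧ v < (p.length : Int)
instance (group : List (List Int)) : Decidable (Pre_conjugacy_classes group) := by
  unfold Pre_conjugacy_classes; infer_instance

def pvWitness_conjugacy_classes : List (List Int) := [[0, 1], [1, 0]]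

def Spec_conjugacy_classes (group : List (List Int)) (out : List (List (List Int))) : Prop := out = conjugacy_classes_alt group
instance (group : List (List Int)) (out : List (List (List Int))) : Decidable (Spec_conjugacy_classes group out) := by unfold Spec_conjugacy_classes; infer_instance

-- ===== CLAIM (what is proved, stated in full; the proofs are below) =====
def Claim_equal_conjugacy_classes : Prop := ∀ (group : List (List Int)), Dom_conjugacy_classes group → Pre_conjugacy_classes group → Spec_conjugacy_classes group (conjugacy_classes group)

-- ===== LEMMAS AND PROOFS =====

-- An element of a pySetD result was already present or is the written value.
lemma mem_pySetD {x v : Int} (xs : List Int) (i : Int) (hx : x ∈ PySem.List.pySetD xs i v) :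
    x ∈ xs ∨ x = v := by
  rw [PySem.List.pySetD, PySem.List.pySet?] at hx
  cases hidx : PySem.List.pyIdx? xs.length i with
  | none =>
    rw [hidx] at hx
    exact Or.inl hx
  | some k =>
    rw [hidx] at hx
    exact List.mem_or_eq_of_mem_set hx

-- A fold of pySetD writes preserves a predicate that holds of the start and of every written value.
lemma foldl_pySetD_forall (l : List Int) (key val : Int → Int) (P : Int → Prop)
    (acc : List Int) (hacc : ∀ x ∈ acc, P x) (hv : ∀ b ∈ l, P (val b)) :
    ∀ x ∈ l.foldl (fun a i => PySem.List.pySetD a (key i) (val i)) acc, P x := by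
  induction l generalizing acc with
  | nil => exact hacc
  | cons b bs ih =>
    rw [List.foldl_cons]
    refine ih _ (fun x hx => ?_) (fun c hc => hv c (List.mem_cons_of_mem _ hc))
    rcases mem_pySetD acc (key b) hx with hmem | rfl
    · exact hacc x hmem
    · exact hv b (List.mem_cons_self ..)

-- A fold of pySetD's preserves the length of the accumulator.
lemma scatter_length (l : List Int) (f v : Int → Int) (acc : List Int) :
    (l.foldl (fun a i => PySem.List.pySetD a (f i) (v i)) acc).length = acc.length := by
  induction l generalizing acc with
  | nil => rfl
  | cons x xs ih =>
    rw [List.foldl_cons, ih]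
    exact PySem.List.length_pySetD acc (f x) (v x)

lemma pyInverse_length (p : List Int) : (pyInverse p).length = p.length := by
  rw [pyInverse]
  rw [scatter_length (PySem.List.pyRange 0 (p.length : Int) 1)
    (fun i => PySem.List.pyGetD p i 0) (fun i => i) (List.replicate p.length 0)]
  exact List.length_replicate

-- inverse() only ever stores loop indices, so its entries lie in [0, len p).
lemma pyInverse_mem (p : List Int) : ∀ x ∈ pyInverse p, 0 ≤ x ∧ x < (p.length : Int) := by
  rw [pyInverse]
  refine foldl_pySetD_forall _ (fun i => PySem.List.pyGetD p i 0) (fun i => i) _ _ ?_ ?_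
  · intro x hx
    have hx0 := List.eq_of_mem_replicate hx
    have hne : p.length ≠ 0 := by
      rintro h0
      rw [h0] at hx
      simp at hx
    subst hx0
    omega
  · intro b hb
    exact PySem.List.mem_pyRange_one.1 hb

lemma pyCompose_length (p q : List Int) : (pyCompose p q).length = p.length := by
  simp [pyCompose, PySem.List.pyRange_zero_natCast]

lemma pyCompose_getD (p q : List Int) (j : Nat) (hj : j < p.length) :
    (pyCompose p q).getD j 0 = PySem.List.pyGetD p (PySem.List.pyGetD q (j : Int) 0) 0 := by
  rw [pyCompose]
  simp only [PySem.List.pyRange_zero_natCast, List.map_map]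
  rw [List.getD_eq_getElem _ _ (by simpa using hj)]
  simp

-- B's inverse loop (over enumerate) is A's inverse loop (over range).
lemma invOf_eq (h : List Int) : invOf h = pyInverse h := by
  rw [invOf, PySem.List.enumerate_eq_map_pyRange h 0, List.foldl_map, pyInverse]
  rfl

-- The conjugate compose(compose(h, g), inverse(h)) is B's one-pass map over inverse(h).
lemma conj_eq (h g : List Int) :
    pyCompose (pyCompose h g) (pyInverse h) =
      (pyInverse h).map (fun k => PySem.List.pyGetD h (PySem.List.pyGetD g k 0) 0) := by
  apply List.ext_getElem
    (by rw [pyCompose_length, pyCompose_length, List.length_map, pyInverse_length])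
  intro j hj1 hj2
  have hjh : j < h.length := by
    rw [pyCompose_length, pyCompose_length] at hj1
    exact hj1
  have hjinv : j < (pyInverse h).length := by rw [pyInverse_length]; exact hjh
  rw [List.getElem_map]
  rw [← List.getD_eq_getElem _ 0 hj1]
  rw [pyCompose_getD _ _ j (by rw [pyCompose_length]; exact hjh)]
  rw [PySem.List.pyGetD_natCast, List.getD_eq_getElem _ _ hjinv]
  obtain ⟨hk0, hklt⟩ := pyInverse_mem h _ (List.getElem_mem hjinv)
  rw [PySem.List.pyGetD_of_nonneg _ _ hk0]
  rw [pyCompose_getD h g _ (by omega)]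
  rw [Int.toNat_of_nonneg hk0]

-- the conjugate B's table stores for (h, g)
def conjMap (h g : List Int) : List Int :=
  (pyInverse h).map (fun k => PySem.List.pyGetD h (PySem.List.pyGetD g k 0) 0)

-- The dict-comprehension init maps every key to the empty set (and missing keys default to it).
lemma init_getD (l : List (List Int)) (d : PySem.Dict (List Int) (PySem.Set (List Int)))
    (hd : ∀ x, PySem.Dict.getD d x PySem.Set.empty = PySem.Set.empty) (x : List Int) :
    PySem.Dict.getD (l.foldl (fun d g => PySem.Dict.insert d g PySem.Set.empty) d) x
      PySem.Set.empty = PySem.Set.empty := by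
  induction l generalizing d with
  | nil => exact hd x
  | cons a l ih =>
    rw [List.foldl_cons]
    refine ih _ (fun y => ?_)
    rw [PySem.Dict.getD_insert]
    by_cases hya : y = a
    · rw [if_pos hya]
    · rw [if_neg hya]
      exact hd y

-- One inner pass 'for g in table: table[g].add(f g)': lookup after the pass.
lemma foldl_modify_getD (l : List (List Int)) (hnd : l.Nodup)
    (f : List Int → List Int) (d : PySem.Dict (List Int) (PySem.Set (List Int))) (g : List Int) :
    PySem.Dict.getD
      (l.foldl (fun d k =>
        PySem.Dict.modify d k PySem.Set.empty (fun s => PySem.Set.add s (f k))) d)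
      g PySem.Set.empty
    = if g ∈ l then
        PySem.Set.add (PySem.Dict.getD d g PySem.Set.empty) (f g)
      else PySem.Dict.getD d g PySem.Set.empty := by
  induction l generalizing d with
  | nil => simp
  | cons a l ih =>
    rw [List.foldl_cons, ih (List.nodup_cons.1 hnd).2]
    by_cases hgl : g ∈ l
    · have hga : g ≠ a := fun h => (List.nodup_cons.1 hnd).1 (h ▸ hgl)
      rw [if_pos hgl, if_pos (List.mem_cons_of_mem _ hgl)]
      rw [PySem.Dict.getD_modify, if_neg hga]
    · by_cases hga : g = a
      · subst hga
        rw [if_neg hgl, if_pos (List.mem_cons_self ..)]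
        rw [PySem.Dict.getD_modify, if_pos rfl]
      · rw [if_neg hgl, if_neg (by simp [hga, hgl])]
        rw [PySem.Dict.getD_modify, if_neg hga]

-- The inner pass 'for g in table: …' keeps the key list unchanged (it only touches present keys).
lemma foldl_modify_keys (l : List (List Int))
    (f : List Int → List Int) (d : PySem.Dict (List Int) (PySem.Set (List Int)))
    (hl : ∀ k ∈ l, k ∈ PySem.Dict.keys d) :
    PySem.Dict.keys
      (l.foldl (fun d k =>
        PySem.Dict.modify d k PySem.Set.empty (fun s => PySem.Set.add s (f k))) d)
    = PySem.Dict.keys d := by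
  induction l generalizing d with
  | nil => rfl
  | cons a l ih =>
    rw [List.foldl_cons]
    have hstep :
        PySem.Dict.keys
          (PySem.Dict.modify d a PySem.Set.empty (fun s => PySem.Set.add s (f a)))
        = PySem.Dict.keys d := by
      rw [PySem.Dict.keys_modify]
      exact PySem.Dict.keys_insert_of_contains _ _
        ((PySem.Dict.contains_iff_mem_keys _ _).2 (hl a (List.mem_cons_self ..)))
    rw [ih _ (fun k hk => by rw [hstep]; exact hl k (List.mem_cons_of_mem _ hk)), hstep]

-- The finished table holds, at every group element g, exactly A's class set for g.
lemma conjTable_getD (group : List (List Int)) (g : List Int) (hg : g ∈ group) :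
    PySem.Dict.getD (conjTable group) g PySem.Set.empty
      = group.foldl (fun s h => PySem.Set.add s (conjMap h g)) PySem.Set.empty := by
  rw [conjTable]
  have hkeys0 :
      PySem.Dict.keys
        (group.foldl (fun d g => PySem.Dict.insert d g PySem.Set.empty)
          (PySem.Dict.empty : PySem.Dict (List Int) (PySem.Set (List Int))))
      = PySem.Set.ofList group := by
    rw [PySem.Dict.keys_foldl_insert]
    rw [PySem.Dict.keys_empty, PySem.Set.update_nil_left]
  have hgen :
      ∀ (hs : List (List Int)) (d : PySem.Dict (List Int) (PySem.Set (List Int))),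
        PySem.Dict.keys d = PySem.Set.ofList group →
        PySem.Dict.getD
          (hs.foldl
            (fun d h =>
              let inv := invOf h
              (PySem.Dict.keys d).foldl
                (fun d g =>
                  PySem.Dict.modify d g PySem.Set.empty
                    (fun s => PySem.Set.add s
                      (inv.map (fun k => PySem.List.pyGetD h (PySem.List.pyGetD g k 0) 0))))
                d)
            d)
          g PySem.Set.empty
        = hs.foldl (fun s h => PySem.Set.add s (conjMap h g))
            (PySem.Dict.getD d g PySem.Set.empty) := by
    intro hs
    induction hs with
    | nil => intro d _; rfl
    | cons h hs ih =>
      intro d hk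
      rw [List.foldl_cons, List.foldl_cons]
      have hnd : (PySem.Dict.keys d).Nodup := by rw [hk]; exact PySem.Set.nodup_ofList group
      rw [ih _ (by
        rw [foldl_modify_keys
          (PySem.Dict.keys d)
          (fun g => (invOf h).map (fun k => PySem.List.pyGetD h (PySem.List.pyGetD g k 0) 0))
          d (fun k hk' => hk'), hk])]
      rw [foldl_modify_getD _ hnd]
      rw [if_pos (by rw [hk]; exact (PySem.Set.mem_ofList group g).2 hg)]
      rw [invOf_eq]
      rfl
  rw [hgen group _ hkeys0]
  rw [init_getD group PySem.Dict.empty (fun x => by rw [PySem.Dict.getD_empty])]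

-- The two scans emit the same class lists: `remaining` and `covered` are complements on group,
-- and B's table lookup is A's class set.
lemma fold_agree (group : List (List Int))
    (clsB : List Int → PySem.Set (List Int))
    (hcls : ∀ g ∈ group, clsB g
      = group.foldl (fun cls h => PySem.Set.add cls (pyCompose (pyCompose h g) (pyInverse h)))
          PySem.Set.empty) :
    ∀ (S : List (List Int)), (∀ g ∈ S, g ∈ group) →
    ∀ (out : List (List (List Int))) (rem cov : PySem.Set (List Int)),
    (∀ x ∈ group, (x ∈ rem ↔ x ∉ cov)) →
    (S.foldl
      (fun st g =>
        if PySem.Set.contains st.2 g then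
          let cls : PySem.Set (List Int) :=
            group.foldl (fun cls h => PySem.Set.add cls (pyCompose (pyCompose h g) (pyInverse h)))
              PySem.Set.empty
          (st.1 ++ [cls], PySem.Set.diff st.2 cls)
        else st)
      (out, rem)).1
    = (S.foldl
      (fun st g =>
        if PySem.Set.contains st.2 g then st
        else (st.1 ++ [clsB g], PySem.Set.union st.2 (clsB g)))
      (out, cov)).1 := by
  intro S
  induction S with
  | nil =>
    intro _ out rem cov _
    rfl
  | cons g S ih =>
    intro hS out rem cov hinv
    have hg : g ∈ group := hS g (List.mem_cons_self ..)
    simp only [List.foldl_cons]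
    by_cases hc : PySem.Set.contains rem g = true
    · have hgrem : g ∈ rem := (PySem.Set.contains_iff rem g).1 hc
      have hgnotcov : g ∉ cov := (hinv g hg).1 hgrem
      have hgcov : PySem.Set.contains cov g = false :=
        Bool.eq_false_iff.2 (fun hb => hgnotcov ((PySem.Set.contains_iff cov g).1 hb))
      rw [if_pos hc, if_neg (by rw [hgcov]; exact Bool.false_ne_true)]
      rw [hcls g hg]
      apply ih (fun x hx => hS x (List.mem_cons_of_mem _ hx))
      intro x hx
      simp only [PySem.Set.mem_diff, PySem.Set.mem_union]
      have hx2 := hinv x hx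
      tauto
    · have hgrem : g ∉ rem := fun hmem => hc ((PySem.Set.contains_iff rem g).2 hmem)
      have hgcov : PySem.Set.contains cov g = true :=
        (PySem.Set.contains_iff cov g).2 (by
          by_contra hnc
          exact hgrem ((hinv g hg).2 hnc))
      rw [if_neg hc, if_pos hgcov]
      exact ih (fun x hx => hS x (List.mem_cons_of_mem _ hx)) out rem cov hinv

-- ===== VERDICT (by name: the statement is the Claim_ definition above) =====
theorem conjugacy_classes_spec : Claim_equal_conjugacy_classes := by
  intro group _ _
  unfold Spec_conjugacy_classes conjugacy_classes conjugacy_classes_alt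
  apply fold_agree group
    (fun g => PySem.Dict.getD (conjTable group) g PySem.Set.empty)
    (fun g hg => by
      show PySem.Dict.getD (conjTable group) g PySem.Set.empty = _
      rw [conjTable_getD group g hg]
      simp only [conjMap, conj_eq])
    _ (fun g hg => (PySem.List.mem_sorted group (fun x => x) false g).1 hg)
  intro x hx
  constructor
  · intro _
    simp [PySem.Set.empty]
  · intro _
    exact (PySem.Set.mem_ofList group x).2 hx
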